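-- pv_equiv track=rewrite | github.com/Kyle-Kerlew/Competitive-Programming-Problems | Beautiful_matrix_1.py | move_toward_center
-- ===== SOURCE A (Python) =====
-- def move_toward_center(pos_x, pos_y, counter=0):
--     while pos_x != 3 or pos_y != 3:
--         if pos_x > 3:
--             pos_x -= 1
--             counter += 1
--         if pos_x < 3:
--             pos_x += 1
--             counter += 1
--         if pos_y > 3:
--             pos_y -= 1
--             counter += 1
--         if pos_y < 3:
--             pos_y += 1
--             counter += 1
--
--     return counter
-- ===== SOURCE B (Python) =====
-- def move_toward_center(pos_x, pos_y, counter=0):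
--     return counter + abs(pos_x - 3) + abs(pos_y - 3)
-- ===== Notes on version B (the rewrite author's own statement) =====
-- stated objective: faster
-- what changed: Replaced the step-by-step walk loop toward the centre cell with the closed-form Manhattan-distance expression counter + abs(pos_x-3) + abs(pos_y-3).
import Mathlib
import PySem

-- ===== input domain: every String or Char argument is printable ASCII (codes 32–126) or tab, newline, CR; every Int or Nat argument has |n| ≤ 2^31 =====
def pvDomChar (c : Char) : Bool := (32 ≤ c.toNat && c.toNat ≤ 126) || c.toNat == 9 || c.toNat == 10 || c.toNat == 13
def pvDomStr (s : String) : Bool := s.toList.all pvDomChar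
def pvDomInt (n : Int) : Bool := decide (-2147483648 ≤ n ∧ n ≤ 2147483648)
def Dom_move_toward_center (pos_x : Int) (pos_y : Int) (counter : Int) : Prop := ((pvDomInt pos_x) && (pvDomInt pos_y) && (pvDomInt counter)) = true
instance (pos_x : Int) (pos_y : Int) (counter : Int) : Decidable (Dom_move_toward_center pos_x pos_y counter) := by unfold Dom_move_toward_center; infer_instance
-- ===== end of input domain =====

-- B replaces A's step-by-step walk loop with the closed-form Manhattan distance (O(1) vs O(d)).


-- ===== PORT A =====
-- literal transliteration of A's while loop, run on a fuel counter (fixed in advance at the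
-- initial Manhattan distance to the centre, which each iteration reduces by at least 1 — a totality
-- guard only, never reached with a different value); the four sequential ifs are the loop body
def mtc_loop : Nat → Int → Int → Int → Int
  | 0, _, _, c => c
  | Nat.succ n, pos_x, pos_y, counter =>
    if pos_x ≠ 3 ∨ pos_y ≠ 3 then
      let x1 := if pos_x > 3 then pos_x - 1 else pos_x
      let c1 := if pos_x > 3 then counter + 1 else counter
      let x2 := if x1 < 3 then x1 + 1 else x1
      let c2 := if x1 < 3 then c1 + 1 else c1
      let y1 := if pos_y > 3 then pos_y - 1 else pos_y
      let c3 := if pos_y > 3 then c2 + 1 else c2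
      let y2 := if y1 < 3 then y1 + 1 else y1
      let c4 := if y1 < 3 then c3 + 1 else c3
      mtc_loop n x2 y2 c4
    else counter

def move_toward_center (pos_x : Int) (pos_y : Int) (counter : Int) : Int :=
  mtc_loop ((pos_x - 3).natAbs + (pos_y - 3).natAbs) pos_x pos_y counter

-- ===== PORT B =====
def move_toward_center_alt (pos_x : Int) (pos_y : Int) (counter : Int) : Int :=
  counter + |pos_x - 3| + |pos_y - 3|

-- ===== PRECONDITION & SPEC =====
def Spec_move_toward_center (pos_x : Int) (pos_y : Int) (counter : Int) (out : Int) : Prop := out = move_toward_center_alt pos_x pos_y counter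
instance (pos_x : Int) (pos_y : Int) (counter : Int) (out : Int) : Decidable (Spec_move_toward_center pos_x pos_y counter out) := by unfold Spec_move_toward_center; infer_instance

-- ===== CLAIM (what is proved, stated in full; the proofs are below) =====
def Claim_equal_move_toward_center : Prop := ∀ (pos_x : Int) (pos_y : Int) (counter : Int), Dom_move_toward_center pos_x pos_y counter → Spec_move_toward_center pos_x pos_y counter (move_toward_center pos_x pos_y counter)

-- ===== LEMMAS AND PROOFS =====

theorem mtc_loop_eq (n : Nat) : ∀ (x y c : Int), (x - 3).natAbs + (y - 3).natAbs ≤ n →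
    mtc_loop n x y c = c + |x - 3| + |y - 3| := by
  induction n with
  | zero =>
    intro x y c h
    have hx : x = 3 := by omega
    have hy : y = 3 := by omega
    subst hx; subst hy
    simp [mtc_loop]
  | succ n ih =>
    intro x y c h
    by_cases hg : x ≠ 3 ∨ y ≠ 3
    · simp only [mtc_loop, if_pos hg]
      rcases hg with hg | hg <;> split_ifs <;>
        rw [ih] <;> (try simp only [Int.abs_eq_natAbs]) <;> omega
    · rcases not_or.mp hg with ⟨h1, h2⟩
      rw [not_not.mp h1, not_not.mp h2]
      simp [mtc_loop]

-- ===== VERDICT (by name: the statement is the Claim_ definition above) =====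
theorem move_toward_center_spec : Claim_equal_move_toward_center := by
  intro x y c _
  show move_toward_center x y c = move_toward_center_alt x y c
  simp only [move_toward_center, move_toward_center_alt]
  exact mtc_loop_eq _ x y c le_rfl
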